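-- pv_equiv track=rewrite | github.com/jihoone2010/Euclid_Algorithm | euclidfunction.py | euclidal
-- ===== SOURCE A (Python) =====
-- def euclidal(a, b):
--     small = a
--     big = b
--     if a>b:
--         small = b
--         big = a
--
--     ablist = []
--     rd = 0
--
--     while True:
--         pastrd = rd
--         pastbig = big
--         rd = big%small
--         multiple = int((big-rd)/small)
--         big = small
--         small = rd
--
--         ablist.append([pastbig, big, rd, multiple])
--
--         if rd == 0:
--            return ablist, big
-- ===== SOURCE B (Python) =====
-- def euclidal(a, b):
--     small, big = (b, a) if a > b else (a, b)
--
--     def step(big, small, table):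
--         q, r = divmod(big, small)
--         table = table + [[big, small, r, q]]
--         return (table, small) if r == 0 else step(small, r, table)
--
--     return step(big, small, [])
-- ===== Notes on version B (the rewrite author's own statement) =====
-- stated objective: idiomatic
-- what changed: Replaces the mutating while-True loop with its float-division quotient int((big-rd)/small) by a recursive helper threading the step table through the Euclidean recurrence, computing quotient and remainder with divmod.
import Mathlib
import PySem

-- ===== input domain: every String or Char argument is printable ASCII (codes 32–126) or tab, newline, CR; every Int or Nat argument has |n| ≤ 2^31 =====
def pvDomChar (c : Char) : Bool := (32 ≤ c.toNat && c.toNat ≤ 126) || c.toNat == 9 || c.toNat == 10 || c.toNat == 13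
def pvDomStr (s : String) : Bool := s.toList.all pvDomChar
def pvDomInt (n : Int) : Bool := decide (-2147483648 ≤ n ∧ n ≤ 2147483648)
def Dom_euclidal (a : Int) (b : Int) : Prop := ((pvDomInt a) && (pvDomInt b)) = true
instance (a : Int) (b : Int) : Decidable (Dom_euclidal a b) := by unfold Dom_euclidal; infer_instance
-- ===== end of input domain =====

-- B replaces A's mutating while-loop (quotient via int((big-rd)/small)) by a recursive helper
-- threading the step table through the Euclidean recurrence with divmod (objective: idiomatic).

-- termination helper, cited by both ports' decreasing_by
theorem pvNatAbsModLt (a b : Int) (hb : b ≠ 0) :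
    (PySem.Int.mod a b).natAbs < b.natAbs := by
  rcases lt_trichotomy b 0 with h | h | h
  · have := PySem.Int.mod_neg_bounds a h
    omega
  · exact absurd h hb
  · have h1 := PySem.Int.mod_nonneg a h
    have h2 := PySem.Int.mod_lt a h
    omega

-- ===== PORT A =====
-- A's `while True` loop as a recursion over the mutable state (small, big, ablist).
-- When small = 0 Python raises ZeroDivisionError; the guard only makes the port total
-- (excluded by Pre_euclidal).  int((big-rd)/small) is ported as (big - rd) / small:
-- small divides big - rd exactly, so the float division is exact and every integer
-- division convention agrees with it.
def euclidalLoop (small big : Int) (ablist : List (List Int)) : List (List Int) × Int :=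
  if hs : small = 0 then (ablist, big)
  else
    let pastbig := big
    let rd := PySem.Int.mod big small
    let multiple := (big - rd) / small
    let big' := small
    let small' := rd
    let ablist' := ablist ++ [[pastbig, big', rd, multiple]]
    if rd = 0 then (ablist', big')
    else euclidalLoop small' big' ablist'
termination_by small.natAbs
decreasing_by exact pvNatAbsModLt big small hs

def euclidal (a : Int) (b : Int) : List (List Int) × Int :=
  if a > b then euclidalLoop b a [] else euclidalLoop a b []

-- ===== PORT B =====
-- B's recursive helper `step`; divmod(big, 0) raises in Python (none case; outside Pre_euclidal).
def euclidStep (big small : Int) (table : List (List Int)) : List (List Int) × Int :=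
  match hd : PySem.Int.divmod? big small with
  | none => (table, small)
  | some (q, r) =>
    let table' := table ++ [[big, small, r, q]]
    if r = 0 then (table', small) else euclidStep small r table'
termination_by small.natAbs
decreasing_by
  have hs : small ≠ 0 := by
    intro h; rw [h] at hd; simp [PySem.Int.divmod?] at hd
  have hr : r = PySem.Int.mod big small := by
    simp [PySem.Int.divmod?, hs] at hd; exact hd.2.symm
  rw [hr]; exact pvNatAbsModLt big small hs

def euclidal_alt (a : Int) (b : Int) : List (List Int) × Int :=
  if a > b then euclidStep a b [] else euclidStep b a []

-- ===== PRECONDITION & SPEC =====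
-- Pre_ excludes exactly min a b = 0, where A raises ZeroDivisionError (big % 0); B's divmod raises there too.
def Pre_euclidal (a : Int) (b : Int) : Prop := min a b ≠ 0
instance (a : Int) (b : Int) : Decidable (Pre_euclidal a b) := by unfold Pre_euclidal; infer_instance
def pvWitness_euclidal : Int × Int := (12, 18)
def Spec_euclidal (a : Int) (b : Int) (out : List (List Int) × Int) : Prop := out = euclidal_alt a b
instance (a : Int) (b : Int) (out : List (List Int) × Int) : Decidable (Spec_euclidal a b out) := by unfold Spec_euclidal; infer_instance

-- ===== CLAIM (what is proved, stated in full; the proofs are below) =====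
def Claim_equal_euclidal : Prop := ∀ (a : Int) (b : Int), Dom_euclidal a b → Pre_euclidal a b → Spec_euclidal a b (euclidal a b)

-- ===== LEMMAS AND PROOFS =====

-- the float quotient A computes equals B's floor quotient: small ∣ big - mod big small
theorem pvQuotEq (big small : Int) (hs : small ≠ 0) :
    (big - PySem.Int.mod big small) / small = PySem.Int.floordiv big small := by
  have h := PySem.Int.floordiv_mul_add_mod big small
  have : big - PySem.Int.mod big small = PySem.Int.floordiv big small * small := by omega
  rw [this, Int.mul_ediv_cancel _ hs]

theorem pvLoopEqStep (small big : Int) (acc : List (List Int)) (hs : small ≠ 0) :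
    euclidalLoop small big acc = euclidStep big small acc := by
  have hd : PySem.Int.divmod? big small
      = some (PySem.Int.floordiv big small, PySem.Int.mod big small) := by
    simp [PySem.Int.divmod?, hs, PySem.Int.floordiv, PySem.Int.mod]
  rw [euclidalLoop, euclidStep]
  rw [hd]
  simp only [hs, dite_false]
  rw [pvQuotEq big small hs]
  by_cases hr : PySem.Int.mod big small = 0
  · simp [hr]
  · simp only [hr, if_false]
    exact pvLoopEqStep _ _ _ hr
termination_by small.natAbs
decreasing_by exact pvNatAbsModLt big small hs

-- ===== VERDICT (by name: the statement is the Claim_ definition above) =====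
theorem euclidal_spec : Claim_equal_euclidal := by
  intro a b _ hpre
  unfold Spec_euclidal euclidal euclidal_alt
  unfold Pre_euclidal at hpre
  by_cases hab : a > b
  · simp only [hab, if_true]
    exact pvLoopEqStep b a [] (by omega)
  · simp only [hab, if_false]
    exact pvLoopEqStep a b [] (by simp at hab; omega)
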